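-- pv_equiv track=rewrite | github.com/ub15/cryptofix | src/patcher.py | extract_relevant_chunk
-- ===== SOURCE A (Python) =====
-- MAX_SOURCE_CHARS = 2000
--
-- def extract_relevant_chunk(source, misuses):
--     if len(source) <= MAX_SOURCE_CHARS:
--         return source, False
--     lines = source.split('\n')
--     total_lines = len(lines)
--     misuse_lines = [m['lineno'] for m in misuses]
--     relevant_lines = set()
--     for lineno in misuse_lines:
--         start = max(0, lineno - 30)
--         end = min(total_lines, lineno + 30)
--         for i in range(start, end):
--             relevant_lines.add(i)
--     for i in range(min(20, total_lines)):
--         relevant_lines.add(i)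
--     chunk_lines = [lines[i] for i in sorted(relevant_lines)]
--     return '\n'.join(chunk_lines), True
-- ===== SOURCE B (Python) =====
-- MAX_SOURCE_CHARS = 2000
--
-- def extract_relevant_chunk(source, misuses):
--     if len(source) <= MAX_SOURCE_CHARS:
--         return source, False
--     lines = source.split('\n')
--     kept = [line for i, line in enumerate(lines)
--             if i < 20 or any(m['lineno'] - 30 <= i < m['lineno'] + 30 for m in misuses)]
--     return '\n'.join(kept), True
-- ===== Notes on version B (the rewrite author's own statement) =====
-- stated objective: alternative
-- what changed: Instead of accumulating a set of relevant line indices over all misuses, sorting it and re-indexing into the lines, B makes a single filtering pass over the enumerated lines keeping each line whose index is under 20 or within 30 of some misuse's lineno.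
import Mathlib
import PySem

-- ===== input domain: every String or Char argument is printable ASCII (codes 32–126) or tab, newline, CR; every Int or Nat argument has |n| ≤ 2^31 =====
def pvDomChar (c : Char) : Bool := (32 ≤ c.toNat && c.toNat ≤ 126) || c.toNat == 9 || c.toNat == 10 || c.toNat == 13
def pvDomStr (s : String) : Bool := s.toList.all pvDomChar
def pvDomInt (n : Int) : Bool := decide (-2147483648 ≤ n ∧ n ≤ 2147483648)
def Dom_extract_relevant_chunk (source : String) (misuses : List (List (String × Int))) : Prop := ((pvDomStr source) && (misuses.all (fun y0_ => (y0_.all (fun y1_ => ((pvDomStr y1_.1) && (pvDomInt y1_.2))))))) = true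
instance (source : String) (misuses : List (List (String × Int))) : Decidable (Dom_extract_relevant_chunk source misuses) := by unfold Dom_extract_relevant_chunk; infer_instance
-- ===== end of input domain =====

-- B replaces A's index-set accumulation + sort + re-indexing by a single filtering pass
-- over the enumerated lines with a per-line keep predicate (alternative decomposition).

-- m['lineno'] as a total function: first value under key "lineno", default 0.
-- Exact wherever the key is present; Pre_ excludes the inputs where Python would raise KeyError.
def pvLineno (m : List (String × Int)) : Int :=
  (((m.find? (fun p => p.1 == "lineno")).map (fun p => p.2)).getD 0)

-- ===== PORT A =====
def extract_relevant_chunk (source : String) (misuses : List (List (String × Int))) : String × Bool :=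
  if PySem.Str.len source ≤ 2000 then (source, false)
  else
    -- source.split('\n'): sep ≠ "", so split? is always some and getD [] is exact
    let lines := (PySem.Str.split? source "\n").getD []
    let total_lines : Int := PySem.List.len lines
    let misuse_lines := misuses.map (fun m => pvLineno m)
    let relevant_lines : PySem.Set Int :=
      misuse_lines.foldl (fun s lineno =>
        (PySem.List.pyRange (max 0 (lineno - 30)) (min total_lines (lineno + 30)) 1).foldl
          (fun s i => PySem.Set.add s i) s) PySem.Set.empty
    let relevant_lines :=
      (PySem.List.pyRange 0 (min 20 total_lines) 1).foldl
        (fun s i => PySem.Set.add s i) relevant_lines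
    -- lines[i]: every i in the set is a valid index, so the total pyGetD is exact here
    let chunk_lines := (PySem.List.sorted relevant_lines (fun x => x) false).map
        (fun i => PySem.List.pyGetD lines i "")
    (PySem.Str.join "\n" chunk_lines, true)

-- ===== PORT B =====
def extract_relevant_chunk_alt (source : String) (misuses : List (List (String × Int))) : String × Bool :=
  if PySem.Str.len source ≤ 2000 then (source, false)
  else
    -- source.split('\n'): sep ≠ "", so split? is always some and getD [] is exact
    let lines := (PySem.Str.split? source "\n").getD []
    let kept := ((PySem.List.enumerate lines 0).filter (fun p =>
        decide (p.1 < 20) ||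
          misuses.any (fun m =>
            decide (pvLineno m - 30 ≤ p.1) && decide (p.1 < pvLineno m + 30)))).map
        (fun p => p.2)
    (PySem.Str.join "\n" kept, true)

-- ===== PRECONDITION & SPEC =====
-- Pre_ excludes only inputs on which Python A raises KeyError: a source longer than 2000
-- characters together with some misuse dict lacking the key "lineno".
def Pre_extract_relevant_chunk (source : String) (misuses : List (List (String × Int))) : Prop :=
  PySem.Str.len source ≤ 2000 ∨ ∀ m ∈ misuses, "lineno" ∈ m.map (fun p => p.1)
instance (source : String) (misuses : List (List (String × Int))) : Decidable (Pre_extract_relevant_chunk source misuses) := by unfold Pre_extract_relevant_chunk; infer_instance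

def pvWitness_extract_relevant_chunk : String × (List (List (String × Int))) :=
  ("ab", [[("lineno", 3)]])

def Spec_extract_relevant_chunk (source : String) (misuses : List (List (String × Int))) (out : String × Bool) : Prop := out = extract_relevant_chunk_alt source misuses
instance (source : String) (misuses : List (List (String × Int))) (out : String × Bool) : Decidable (Spec_extract_relevant_chunk source misuses out) := by unfold Spec_extract_relevant_chunk; infer_instance

-- ===== CLAIM (what is proved, stated in full; the proofs are below) =====
def Claim_equal_extract_relevant_chunk : Prop := ∀ (source : String) (misuses : List (List (String × Int))), Dom_extract_relevant_chunk source misuses → Pre_extract_relevant_chunk source misuses → Spec_extract_relevant_chunk source misuses (extract_relevant_chunk source misuses)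

-- ===== LEMMAS AND PROOFS =====

lemma pv_nodup_foldl_add (l : List Int) (s : PySem.Set Int) (hs : s.Nodup) :
    (l.foldl (fun s i => PySem.Set.add s i) s).Nodup := by
  induction l generalizing s with
  | nil => exact hs
  | cons a t ih => exact ih _ (PySem.Set.nodup_add s a hs)

lemma pv_mem_foldl_add (l : List Int) (s : PySem.Set Int) (x : Int) :
    x ∈ l.foldl (fun s i => PySem.Set.add s i) s ↔ x ∈ s ∨ x ∈ l := by
  induction l generalizing s with
  | nil => simp
  | cons a t ih =>
    simp only [List.foldl_cons, ih, PySem.Set.mem_add, List.mem_cons]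
    tauto

lemma pv_mem_outer (tot : Int) (ls : List Int) (s : PySem.Set Int) (x : Int) :
    (x ∈ ls.foldl (fun s lineno =>
        (PySem.List.pyRange (max 0 (lineno - 30)) (min tot (lineno + 30)) 1).foldl
          (fun s i => PySem.Set.add s i) s) s)
      ↔ x ∈ s ∨ ∃ l ∈ ls, max 0 (l - 30) ≤ x ∧ x < min tot (l + 30) := by
  induction ls generalizing s with
  | nil => simp
  | cons a t ih =>
    simp only [List.foldl_cons, ih, pv_mem_foldl_add, PySem.List.mem_pyRange_one,
      List.mem_cons]
    constructor
    · rintro ((h | h) | ⟨l, hl, h⟩)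
      · exact Or.inl h
      · exact Or.inr ⟨a, Or.inl rfl, h⟩
      · exact Or.inr ⟨l, Or.inr hl, h⟩
    · rintro (h | ⟨l, (rfl | hl), h⟩)
      · exact Or.inl (Or.inl h)
      · exact Or.inl (Or.inr h)
      · exact Or.inr ⟨l, hl, h⟩

lemma pv_nodup_outer (tot : Int) (ls : List Int) (s : PySem.Set Int) (hs : s.Nodup) :
    (ls.foldl (fun s lineno =>
        (PySem.List.pyRange (max 0 (lineno - 30)) (min tot (lineno + 30)) 1).foldl
          (fun s i => PySem.Set.add s i) s) s).Nodup := by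
  induction ls generalizing s with
  | nil => exact hs
  | cons a t ih => exact ih _ (pv_nodup_foldl_add _ _ hs)

-- the heart of the equivalence: A's sorted-set indices, read back through lines,
-- are exactly B's filtered enumeration
lemma pv_chunk_eq (lines : List String) (misuses : List (List (String × Int))) :
    (PySem.List.sorted
        ((PySem.List.pyRange 0 (min 20 (PySem.List.len lines)) 1).foldl
          (fun s i => PySem.Set.add s i)
          ((misuses.map (fun m => pvLineno m)).foldl
            (fun s lineno =>
              (PySem.List.pyRange (max 0 (lineno - 30)) (min (PySem.List.len lines) (lineno + 30)) 1).foldl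
                (fun s i => PySem.Set.add s i) s) PySem.Set.empty))
        (fun x => x) false).map (fun i => PySem.List.pyGetD lines i "") =
    ((PySem.List.enumerate lines 0).filter (fun p =>
        decide (p.1 < 20) ||
          misuses.any (fun m =>
            decide (pvLineno m - 30 ≤ p.1) && decide (p.1 < pvLineno m + 30)))).map
        (fun p => p.2) := by
  set tot := PySem.List.len lines with htot
  set S := ((PySem.List.pyRange 0 (min 20 tot) 1).foldl
          (fun s i => PySem.Set.add s i)
          ((misuses.map (fun m => pvLineno m)).foldl
            (fun s lineno =>
              (PySem.List.pyRange (max 0 (lineno - 30)) (min tot (lineno + 30)) 1).foldl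
                (fun s i => PySem.Set.add s i) s) PySem.Set.empty)) with hS
  set pred := (fun (i : Int) =>
        decide (i < 20) ||
          misuses.any (fun m =>
            decide (pvLineno m - 30 ≤ i) && decide (i < pvLineno m + 30))) with hpred
  -- B's side: filter over the enumeration = filter over the index range
  rw [PySem.List.enumerate_eq_map_pyRange lines "", List.filter_map, List.map_map]
  have hcomp : ((fun p : Int × String =>
        decide (p.1 < 20) ||
          misuses.any (fun m =>
            decide (pvLineno m - 30 ≤ p.1) && decide (p.1 < pvLineno m + 30))) ∘
        (fun j => (j, PySem.List.pyGetD lines j ""))) = pred := rfl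
  rw [hcomp]
  have hmapcomp : ((fun p : Int × String => p.2) ∘ (fun j => (j, PySem.List.pyGetD lines j "")))
      = (fun j => PySem.List.pyGetD lines j "") := rfl
  rw [hmapcomp]
  -- A's side: name the sorted order
  have hsorted : PySem.List.sorted S (fun x => x) false
      = (PySem.List.pyRange 0 tot 1).filter pred := by
    apply PySem.List.sorted_eq_of_perm_of_pairwise_lt
    · refine (List.perm_ext_iff_of_nodup
        (List.Nodup.filter _ (PySem.List.nodup_pyRange_one 0 tot))
        (pv_nodup_foldl_add _ _ (pv_nodup_outer tot _ _ List.nodup_nil))).mpr ?_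
      intro x
      rw [List.mem_filter, PySem.List.mem_pyRange_one, pv_mem_foldl_add,
        pv_mem_outer, PySem.List.mem_pyRange_one, hpred]
      simp only [List.mem_map, List.not_mem_nil, false_or, Bool.or_eq_true,
        Bool.and_eq_true, decide_eq_true_eq, List.any_eq_true]
      constructor
      · rintro ⟨⟨h0, h1⟩, (h2 | ⟨m, hm, h3, h4⟩)⟩
        · exact Or.inr ⟨by omega, by omega⟩
        · exact Or.inl ⟨pvLineno m, ⟨m, hm, rfl⟩, by omega, by omega⟩
      · rintro (⟨l, ⟨m, hm, rfl⟩, h3, h4⟩ | ⟨h0, h1⟩)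
        · exact ⟨⟨by omega, by omega⟩, Or.inr ⟨m, hm, by omega, by omega⟩⟩
        · exact ⟨⟨h0, by omega⟩, Or.inl (by omega)⟩
    · exact List.Pairwise.filter _ (PySem.List.pairwise_lt_pyRange_one 0 tot)
  rw [hsorted]

-- ===== VERDICT (by name: the statement is the Claim_ definition above) =====
theorem extract_relevant_chunk_spec : Claim_equal_extract_relevant_chunk := by
  intro source misuses _ hpre
  unfold Spec_extract_relevant_chunk extract_relevant_chunk extract_relevant_chunk_alt
  by_cases hlen : PySem.Str.len source ≤ 2000
  · rw [if_pos hlen, if_pos hlen]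
  · rw [if_neg hlen, if_neg hlen]
    exact congrArg (fun l => (PySem.Str.join "\n" l, true)) (pv_chunk_eq _ misuses)
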